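-- pv_equiv track=rewrite | github.com/sophia09zheng13/markdown-compiler | markdown_compiler/util/line_functions.py | compile_headers
-- ===== SOURCE A (Python) =====
-- def compile_headers(line):
--     """
--     Convert markdown headers into <h1>, <h2>, etc tags.
--     """
--     result = ""
--     for i in range(6, 0, -1):
--         prefix = "#" * i + " "
--         if line[:i + 1] == prefix:
--             result = f"<h{i}> {line[i + 1:]}</h{i}>"
--     if result == "":
--         return line
--     return result
-- ===== SOURCE B (Python) =====
-- def compile_headers(line):
--     """
--     Convert markdown headers into <h1>, <h2>, etc tags.
--     """
--     n = len(line) - len(line.lstrip('#'))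
--     if 1 <= n <= 6 and line[n:n + 1] == ' ':
--         return f"<h{n}> {line[n + 1:]}</h{n}>"
--     return line
-- ===== Notes on version B (the rewrite author's own statement) =====
-- stated objective: simpler
-- what changed: Replaces the loop over all six header levels (each building a prefix string and re-slicing the line) with a single leading-hash count n = len(line) - len(line.lstrip(hash)) followed by one guarded slice test, exploiting that at most one of the six prefixes can ever match.
import Mathlib
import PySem

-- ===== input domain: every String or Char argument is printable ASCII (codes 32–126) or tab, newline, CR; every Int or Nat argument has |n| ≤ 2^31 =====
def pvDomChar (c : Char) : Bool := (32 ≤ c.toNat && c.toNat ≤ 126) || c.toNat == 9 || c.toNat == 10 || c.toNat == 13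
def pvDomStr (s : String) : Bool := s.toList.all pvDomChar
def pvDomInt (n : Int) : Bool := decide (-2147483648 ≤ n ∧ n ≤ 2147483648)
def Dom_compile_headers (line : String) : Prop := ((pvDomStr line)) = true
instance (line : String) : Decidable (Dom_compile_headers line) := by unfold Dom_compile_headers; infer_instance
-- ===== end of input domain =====

-- B replaces A's loop over all six header levels by a single leading-hash count and one guarded
-- slice test (simpler; at most one of A's six prefixes can ever match).

-- the f-string f"<h{i}> {rest}</h{i}>" (identical text in both Pythons)
def hFmt (i : Int) (rest : List Char) : String :=
  String.ofList (('<' :: 'h' :: PySem.Int.toChars i) ++ ('>' :: ' ' :: rest) ++ ('<' :: '/' :: 'h' :: PySem.Int.toChars i) ++ ['>'])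

-- ===== PORT A =====
def compile_headers (line : String) : String :=
  let result : String :=
    (PySem.List.pyRange 6 0 (-1)).foldl (fun result i =>
      -- if line[:i+1] == "#" * i + " ":  result = f"<h{i}> {line[i+1:]}</h{i}>"
      if PySem.List.slice line.toList none (some (i + 1)) = PySem.List.pyRepeat ['#'] i ++ [' '] then
        hFmt i (PySem.List.slice line.toList (some (i + 1)) none)
      else result) ""
  if result = "" then line else result

-- ===== PORT B =====
def compile_headers_alt (line : String) : String :=
  -- n = len(line) - len(line.lstrip('#')); lstrip('#') drops the leading '#'s, exactly List.dropWhile (· == '#')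
  if 1 ≤ (line.toList.length : Int) - ((line.toList.dropWhile (· == '#')).length : Int) ∧
      (line.toList.length : Int) - ((line.toList.dropWhile (· == '#')).length : Int) ≤ 6 ∧
      PySem.List.slice line.toList
        (some ((line.toList.length : Int) - ((line.toList.dropWhile (· == '#')).length : Int)))
        (some ((line.toList.length : Int) - ((line.toList.dropWhile (· == '#')).length : Int) + 1)) = [' '] then
    hFmt ((line.toList.length : Int) - ((line.toList.dropWhile (· == '#')).length : Int))
      (PySem.List.slice line.toList
        (some ((line.toList.length : Int) - ((line.toList.dropWhile (· == '#')).length : Int) + 1)) none)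
  else line

-- ===== PRECONDITION & SPEC =====
def Spec_compile_headers (line : String) (out : String) : Prop := out = compile_headers_alt line
instance (line : String) (out : String) : Decidable (Spec_compile_headers line out) := by unfold Spec_compile_headers; infer_instance

-- ===== CLAIM (what is proved, stated in full; the proofs are below) =====
def Claim_equal_compile_headers : Prop := ∀ (line : String), Dom_compile_headers line → Spec_compile_headers line (compile_headers line)

-- ===== LEMMAS AND PROOFS =====

lemma hFmt_ne_empty (i : Int) (rest : List Char) : hFmt i rest ≠ "" := by
  intro h
  have := congrArg String.toList h
  simp [hFmt] at this

-- the prefix "#"*i + " " matches iff the leading-hash count is exactly i and the char after it is ' '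
lemma take_hash_space (l : List Char) (i : Nat) :
    l.take (i + 1) = List.replicate i '#' ++ [' '] ↔
      ((l.takeWhile (· == '#')).length = i ∧ l[i]? = some ' ') := by
  induction i generalizing l with
  | zero =>
    cases l with
    | nil => simp
    | cons c t =>
      constructor
      · intro h
        have hc : c = ' ' := by
          have h0 := congrArg List.head? h
          simpa [List.take_succ_cons] using h0
        subst hc; simp [List.takeWhile]
      · rintro ⟨h1, h2⟩
        have hc : c = ' ' := by simpa using h2
        subst hc; simp
  | succ i ih =>
    cases l with
    | nil => simp
    | cons c t =>
      by_cases hc : c = '#'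
      · subst hc
        have hcb : ('#' == '#') = true := by decide
        simp only [List.take_succ_cons, List.replicate_succ, List.cons_append,
          List.takeWhile, hcb, List.length_cons, List.cons.injEq, true_and,
          List.getElem?_cons_succ]
        rw [ih t]
        constructor
        · rintro ⟨h1, h2⟩; exact ⟨by omega, h2⟩
        · rintro ⟨h1, h2⟩; exact ⟨by omega, h2⟩
      · constructor
        · intro h
          have h0 : c = '#' := by
            have h1 := congrArg (fun xs => xs[0]?) h
            simpa [List.replicate_succ] using h1
          exact absurd h0 hc
        · rintro ⟨h1, h2⟩
          have hcb : (c == '#') = false := by simpa using hc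
          simp [hcb] at h1
      
-- A's i-th loop condition, phrased on the leading-hash count
lemma condIff (l : List Char) (i : Nat) :
    (PySem.List.slice l none (some ((i : Int) + 1)) = PySem.List.pyRepeat ['#'] (i : Int) ++ [' ']) ↔
      ((l.takeWhile (· == '#')).length = i ∧ l[i]? = some ' ') := by
  have h1 : ((i : Int) + 1) = (((i + 1 : Nat)) : Int) := by push_cast; ring
  rw [h1, PySem.List.slice_to_natCast, PySem.List.pyRepeat_singleton, Int.toNat_natCast]
  exact take_hash_space l i

lemma dropTakeOne (l : List Char) (m : Nat) : (l.drop m).take 1 = [' '] ↔ l[m]? = some ' ' := by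
  have hh : l[m]? = (l.drop m).head? := by
    cases hd : l.drop m <;> simp [← List.head?_drop, hd]
  cases hd : l.drop m <;> simp [hh, hd]

lemma hrange6 : PySem.List.pyRange 6 0 (-1) = [6, 5, 4, 3, 2, 1] := by decide

set_option maxHeartbeats 1000000 in
lemma main_eq (line : String) : compile_headers line = compile_headers_alt line := by
  obtain ⟨m, hm⟩ : ∃ m, (line.toList.takeWhile (· == '#')).length = m := ⟨_, rfl⟩
  have hn : (line.toList.length : Int) - ((line.toList.dropWhile (· == '#')).length : Int) = (m : Int) := by
    have hlen : (line.toList.takeWhile (· == '#')).length + (line.toList.dropWhile (· == '#')).length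
        = line.toList.length := by
      have h := congrArg List.length
        (List.takeWhile_append_dropWhile (p := (· == '#')) (l := line.toList))
      rwa [List.length_append] at h
    omega
  have c1 := condIff line.toList 1
  have c2 := condIff line.toList 2
  have c3 := condIff line.toList 3
  have c4 := condIff line.toList 4
  have c5 := condIff line.toList 5
  have c6 := condIff line.toList 6
  rw [hm] at c1 c2 c3 c4 c5 c6
  norm_num at c1 c2 c3 c4 c5 c6
  -- the replicate prefixes, as the literal lists simp normalises them to (definitional equalities)
  have c2' : (PySem.List.slice line.toList none (some 3) = ['#', '#', ' ']) ↔
      (m = 2 ∧ line.toList[2]? = some ' ') := c2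
  have c3' : (PySem.List.slice line.toList none (some 4) = ['#', '#', '#', ' ']) ↔
      (m = 3 ∧ line.toList[3]? = some ' ') := c3
  have c4' : (PySem.List.slice line.toList none (some 5) = ['#', '#', '#', '#', ' ']) ↔
      (m = 4 ∧ line.toList[4]? = some ' ') := c4
  have c5' : (PySem.List.slice line.toList none (some 6) = ['#', '#', '#', '#', '#', ' ']) ↔
      (m = 5 ∧ line.toList[5]? = some ' ') := c5
  have c6' : (PySem.List.slice line.toList none (some 7) = ['#', '#', '#', '#', '#', '#', ' ']) ↔
      (m = 6 ∧ line.toList[6]? = some ' ') := c6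
  have hBs : PySem.List.slice line.toList (some (m : Int)) (some ((m : Int) + 1))
      = (line.toList.drop m).take 1 := by
    have h1 : ((m : Int) + 1) = ((m : Int) + ((1 : Nat) : Int)) := by push_cast; ring
    rw [h1, PySem.List.slice_natCast_add]
  unfold compile_headers compile_headers_alt
  rw [hrange6, hn]
  simp only [List.foldl_cons, List.foldl_nil]
  norm_num
  by_cases hB : 1 ≤ m ∧ m ≤ 6 ∧ line.toList[m]? = some ' '
  · obtain ⟨hm1, hm6, hsp⟩ := hB
    have hBc : 1 ≤ m ∧ m ≤ 6 ∧
        PySem.List.slice line.toList (some (m : Int)) (some ((m : Int) + 1)) = [' '] := by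
      refine ⟨hm1, hm6, ?_⟩
      rw [hBs]
      exact (dropTakeOne line.toList m).mpr hsp
    rw [if_pos hBc]
    interval_cases m <;> simp [c1, c2', c3', c4', c5', c6', hsp, hFmt_ne_empty]
  · have hBc : ¬ (1 ≤ m ∧ m ≤ 6 ∧
        PySem.List.slice line.toList (some (m : Int)) (some ((m : Int) + 1)) = [' ']) := by
      rintro ⟨h1, h2, h3⟩
      rw [hBs] at h3
      exact hB ⟨by omega, by omega, (dropTakeOne line.toList m).mp h3⟩
    have nj : ∀ j : Nat, 1 ≤ j → j ≤ 6 → ¬ (m = j ∧ line.toList[j]? = some ' ') := by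
      rintro j hj1 hj6 ⟨h1, h2⟩
      exact hB ⟨by omega, by omega, by rw [h1]; exact h2⟩
    have n1 : ¬ (m = 1 ∧ line.toList[1]? = some ' ') := nj 1 (by norm_num) (by norm_num)
    have n2 : ¬ (m = 2 ∧ line.toList[2]? = some ' ') := nj 2 (by norm_num) (by norm_num)
    have n3 : ¬ (m = 3 ∧ line.toList[3]? = some ' ') := nj 3 (by norm_num) (by norm_num)
    have n4 : ¬ (m = 4 ∧ line.toList[4]? = some ' ') := nj 4 (by norm_num) (by norm_num)
    have n5 : ¬ (m = 5 ∧ line.toList[5]? = some ' ') := nj 5 (by norm_num) (by norm_num)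
    have n6 : ¬ (m = 6 ∧ line.toList[6]? = some ' ') := nj 6 (by norm_num) (by norm_num)
    simp [c1, c2', c3', c4', c5', c6', n1, n2, n3, n4, n5, n6, hBc]

-- ===== VERDICT (by name: the statement is the Claim_ definition above) =====
theorem compile_headers_spec : Claim_equal_compile_headers := by
  intro line _
  unfold Spec_compile_headers
  exact main_eq line
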